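-- pv_equiv track=rewrite | github.com/kambarakun/fetch-tokyo-idsc-github-actions | tests/test_helpers.py | create_test_csv_data
-- ===== SOURCE A (Python) =====
-- def create_test_csv_data(rows: int = 100, columns: int = 2, include_headers: bool = True, separator: str = ",") -> str:
--     """テスト用CSVデータを生成する。
--
--     Args:
--         rows: 生成する行数
--         columns: 生成する列数
--         include_headers: ヘッダー行を含めるか
--         separator: 区切り文字
--
--     Returns:
--         生成されたCSVデータ
--     """
--     lines = []
--
--     if include_headers:
--         headers = [f"col{i}" for i in range(columns)]
--         lines.append(separator.join(headers))
--
--     for row_idx in range(rows):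
--         row_data = [str(row_idx * columns + col_idx) for col_idx in range(columns)]
--         lines.append(separator.join(row_data))
--
--     return "\n".join(lines)
-- ===== SOURCE B (Python) =====
-- def create_test_csv_data(rows: int = 100, columns: int = 2, include_headers: bool = True, separator: str = ",") -> str:
--     # Build all cell values once as one flat run of consecutive integers,
--     # then assemble each row by slicing that flat list.
--     cells = [str(n) for n in range(max(rows, 0) * max(columns, 0))]
--     lines = [separator.join(cells[r * columns:(r + 1) * columns]) for r in range(rows)]
--     if include_headers:
--         lines = [separator.join("col%d" % i for i in range(columns))] + lines
--     return "\n".join(lines)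
-- ===== Notes on version B (the rewrite author's own statement) =====
-- stated objective: alternative
-- what changed: B precomputes the flat list of all cell strings from one range(rows*columns) and builds each row by slicing that list, instead of A's per-row inner comprehension computing row_idx*columns+col_idx; the header is prepended by list concatenation rather than appended to a mutable accumulator.
import Mathlib
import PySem

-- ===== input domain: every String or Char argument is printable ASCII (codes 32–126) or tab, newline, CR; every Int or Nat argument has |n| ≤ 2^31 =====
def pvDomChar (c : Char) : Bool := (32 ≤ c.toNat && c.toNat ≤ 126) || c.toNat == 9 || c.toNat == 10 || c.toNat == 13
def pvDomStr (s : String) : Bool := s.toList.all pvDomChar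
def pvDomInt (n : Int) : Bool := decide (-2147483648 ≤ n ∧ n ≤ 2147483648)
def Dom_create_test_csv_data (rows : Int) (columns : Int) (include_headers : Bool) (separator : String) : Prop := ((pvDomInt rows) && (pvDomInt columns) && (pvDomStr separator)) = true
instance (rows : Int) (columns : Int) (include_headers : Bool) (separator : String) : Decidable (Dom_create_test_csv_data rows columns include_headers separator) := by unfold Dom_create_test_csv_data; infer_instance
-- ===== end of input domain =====

-- B builds the flat list of all cell strings once and slices it per row (alternative decomposition, same cost).

-- ===== PORT A =====
def create_test_csv_data (rows : Int) (columns : Int) (include_headers : Bool) (separator : String) : String :=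
  PySem.Str.join "\n"
    ((PySem.List.pyRange 0 rows 1).foldl (fun acc row_idx =>
        acc ++ [PySem.Str.join separator ((PySem.List.pyRange 0 columns 1).map (fun col_idx => PySem.Int.toStr (row_idx * columns + col_idx)))])
      (if include_headers then
        ([] : List String) ++ [PySem.Str.join separator ((PySem.List.pyRange 0 columns 1).map (fun i => "col" ++ PySem.Int.toStr i))]
      else []))

-- ===== PORT B =====
def create_test_csv_data_alt (rows : Int) (columns : Int) (include_headers : Bool) (separator : String) : String :=
  PySem.Str.join "\n"
    ((if include_headers then
        [PySem.Str.join separator ((PySem.List.pyRange 0 columns 1).map (fun i => "col" ++ PySem.Int.toStr i))]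
      else []) ++
      (PySem.List.pyRange 0 rows 1).map (fun r =>
        PySem.Str.join separator
          (PySem.List.slice ((PySem.List.pyRange 0 (max rows 0 * max columns 0) 1).map PySem.Int.toStr)
            (some (r * columns)) (some ((r + 1) * columns)))))

-- ===== PRECONDITION & SPEC =====
def Spec_create_test_csv_data (rows : Int) (columns : Int) (include_headers : Bool) (separator : String) (out : String) : Prop := out = create_test_csv_data_alt rows columns include_headers separator
instance (rows : Int) (columns : Int) (include_headers : Bool) (separator : String) (out : String) : Decidable (Spec_create_test_csv_data rows columns include_headers separator out) := by unfold Spec_create_test_csv_data; infer_instance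

-- ===== CLAIM (what is proved, stated in full; the proofs are below) =====
def Claim_equal_create_test_csv_data : Prop := ∀ (rows : Int) (columns : Int) (include_headers : Bool) (separator : String), Dom_create_test_csv_data rows columns include_headers separator → Spec_create_test_csv_data rows columns include_headers separator (create_test_csv_data rows columns include_headers separator)

-- ===== LEMMAS AND PROOFS =====

-- appending one element per step is mapping
theorem pv_foldl_push {α β : Type} (f : α → β) :
    ∀ (xs : List α) (init : List β),
      xs.foldl (fun acc x => acc ++ [f x]) init = init ++ xs.map f := by
  intro xs
  induction xs with
  | nil => intro init; simp
  | cons x xs ih => intro init; simp [List.foldl_cons, ih]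

-- slicing the flat cell list at row r gives exactly A's row comprehension
theorem pv_row_slice (rows columns r : Int) (hr0 : 0 ≤ r) (hr : r < rows) :
    PySem.List.slice ((PySem.List.pyRange 0 (max rows 0 * max columns 0) 1).map PySem.Int.toStr)
        (some (r * columns)) (some ((r + 1) * columns))
      = (PySem.List.pyRange 0 columns 1).map (fun col_idx => PySem.Int.toStr (r * columns + col_idx)) := by
  have hrows : 0 < rows := lt_of_le_of_lt hr0 hr
  have hmr : max rows 0 = rows := max_eq_left (le_of_lt hrows)
  by_cases hc : columns ≤ 0
  · have hmc : max columns 0 = 0 := max_eq_right hc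
    rw [hmr, hmc, mul_zero, PySem.List.pyRange_one_eq_nil (le_refl 0),
        PySem.List.pyRange_one_eq_nil hc]
    simp [PySem.List.slice]
  · rw [not_le] at hc
    have hmc : max columns 0 = columns := max_eq_left (le_of_lt hc)
    rw [hmr, hmc]
    have ha : (0:Int) ≤ r * columns := mul_nonneg hr0 (le_of_lt hc)
    have hb : (0:Int) ≤ (r + 1) * columns := mul_nonneg (by omega) (le_of_lt hc)
    have hab : r * columns ≤ (r + 1) * columns := by nlinarith
    have hbn : (r + 1) * columns ≤ rows * columns := by nlinarith
    rw [PySem.List.slice_toNat _ ha hb]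
    rw [PySem.List.pyRange_one_append 0 (r * columns) (rows * columns) ha (le_trans hab hbn),
        PySem.List.pyRange_one_append (r * columns) ((r + 1) * columns) (rows * columns) hab hbn]
    rw [List.map_append, List.map_append]
    have hlen1 : ((PySem.List.pyRange 0 (r * columns) 1).map PySem.Int.toStr).length = (r * columns).toNat := by
      simp [PySem.List.length_pyRange_one]
    rw [← hlen1, List.drop_left, hlen1]
    have hlen2 : ((PySem.List.pyRange (r * columns) ((r + 1) * columns) 1).map PySem.Int.toStr).length
        = ((r + 1) * columns).toNat - (r * columns).toNat := by
      simp [PySem.List.length_pyRange_one]; omega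
    rw [← hlen2, List.take_left]
    rw [PySem.List.pyRange_one (r * columns) ((r + 1) * columns), PySem.List.pyRange_one 0 columns]
    have hcnt : ((r + 1) * columns - r * columns).toNat = (columns - 0).toNat := by
      have : (r + 1) * columns - r * columns = columns := by ring
      rw [this]; omega
    rw [hcnt]
    simp [List.map_map, Function.comp]

-- ===== VERDICT (by name: the statement is the Claim_ definition above) =====
theorem create_test_csv_data_spec : Claim_equal_create_test_csv_data := by
  intro rows columns include_headers separator _
  unfold Spec_create_test_csv_data create_test_csv_data create_test_csv_data_alt
  rw [pv_foldl_push]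
  have hrowseq :
      (PySem.List.pyRange 0 rows 1).map (fun r =>
          PySem.Str.join separator
            (PySem.List.slice ((PySem.List.pyRange 0 (max rows 0 * max columns 0) 1).map PySem.Int.toStr)
              (some (r * columns)) (some ((r + 1) * columns))))
        = (PySem.List.pyRange 0 rows 1).map (fun row_idx =>
            PySem.Str.join separator ((PySem.List.pyRange 0 columns 1).map
              (fun col_idx => PySem.Int.toStr (row_idx * columns + col_idx)))) := by
    apply List.map_congr_left
    intro r hrmem
    have hr := (PySem.List.mem_pyRange_one).mp hrmem
    rw [pv_row_slice rows columns r hr.1 hr.2]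
  rw [hrowseq]
  cases include_headers <;> simp
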